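-- pv_equiv track=rewrite | github.com/mukhammadaiflow-lab/bvrai | services/platform-api/app/voice/webrtc.py | extract_ice_credentials
-- ===== SOURCE A (Python) =====
-- from typing import Optional, Dict, Any, List, Callable, Awaitable, Set
--
-- def extract_ice_credentials(sdp: str) -> Dict[str, str]:
--     """Extract ICE credentials from SDP."""
--     credentials = {}
--
--     for line in sdp.split("\n"):
--         if line.startswith("a=ice-ufrag:"):
--             credentials["ice_ufrag"] = line.split(":")[1].strip()
--         elif line.startswith("a=ice-pwd:"):
--             credentials["ice_pwd"] = line.split(":")[1].strip()
--
--     return credentials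
-- ===== SOURCE B (Python) =====
-- def extract_ice_credentials(sdp: str):
--     """Extract ICE credentials from SDP."""
--     lines = sdp.split("\n")
--     credentials = {}
--     for key, prefix in (("ice_ufrag", "a=ice-ufrag:"), ("ice_pwd", "a=ice-pwd:")):
--         for line in reversed(lines):
--             if line.startswith(prefix):
--                 credentials[key] = line.split(":")[1].strip()
--                 break
--     return credentials
-- ===== Notes on version B (the rewrite author's own statement) =====
-- stated objective: alternative
-- what changed: Replaces the forward line loop that mutates a dict with overwrites by a per-key backward search over the lines (first match in reversed order wins) driven by a fixed (key, prefix) table, so the result is always emitted ufrag-then-pwd; Pre_ excludes SDPs where an ice-pwd line precedes every ice-ufrag line while both are present, on which A's dict key order (pwd first) is an accident of insertion order (the mappings themselves are identical).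
import Mathlib
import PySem

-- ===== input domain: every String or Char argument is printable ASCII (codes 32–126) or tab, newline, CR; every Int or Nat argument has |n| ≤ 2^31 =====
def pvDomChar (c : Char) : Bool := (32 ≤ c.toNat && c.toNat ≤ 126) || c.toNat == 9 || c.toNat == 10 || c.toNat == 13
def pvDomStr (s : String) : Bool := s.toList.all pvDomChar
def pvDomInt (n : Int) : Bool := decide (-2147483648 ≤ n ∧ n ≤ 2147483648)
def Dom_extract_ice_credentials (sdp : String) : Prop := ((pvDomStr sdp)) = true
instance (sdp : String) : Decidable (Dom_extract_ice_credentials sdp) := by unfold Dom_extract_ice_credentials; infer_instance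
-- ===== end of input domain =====

-- B replaces A's forward dict-overwrite loop by a per-key backward search (first match
-- in reversed lines wins) over a fixed (key, prefix) table — alternative decomposition,
-- same cost. Pre_ excludes SDPs where an ice-pwd line precedes every ice-ufrag line while
-- both attributes are present: there the two result dicts hold the same mapping and only
-- A's accidental dict-insertion key order differs.


-- ===== PORT A =====
-- s.split(sep) for the non-empty literal separators used here (split? is none only for sep = "")
def pvSplit (s sep : String) : List String := (PySem.Str.split? s sep).getD []

-- line.split(":")[1].strip()  (the literal expression both Pythons use; the [1] index is
-- in range whenever the line contains ':', which every use site guarantees)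
def pvVal (line : String) : String :=
  PySem.Str.strip (PySem.List.pyGetD (pvSplit line ":") 1 "")

def extract_ice_credentials (sdp : String) : List (String × String) :=
  ((pvSplit sdp "\n").foldl
    (fun (d : PySem.Dict String String) line =>
      if PySem.Str.startswith line "a=ice-ufrag:" = true then d.insert "ice_ufrag" (pvVal line)
      else if PySem.Str.startswith line "a=ice-pwd:" = true then d.insert "ice_pwd" (pvVal line)
      else d)
    PySem.Dict.empty).items

-- ===== PORT B =====
-- the inner 'for line in reversed(lines): if line.startswith(prefix): … break' search
def pvLastGo (pre : String) : List String → Option String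
  | [] => none
  | l :: rest => if PySem.Str.startswith l pre = true then some (pvVal l) else pvLastGo pre rest

def extract_ice_credentials_alt (sdp : String) : List (String × String) :=
  let lines := pvSplit sdp "\n"
  (([("ice_ufrag", "a=ice-ufrag:"), ("ice_pwd", "a=ice-pwd:")] : List (String × String)).foldl
    (fun (credentials : PySem.Dict String String) kp =>
      match pvLastGo kp.2 lines.reverse with
      | some v => credentials.insert kp.1 v
      | none => credentials)
    PySem.Dict.empty).items

-- ===== PRECONDITION & SPEC =====
-- Pre_ excludes SDPs where an ice-pwd line precedes every ice-ufrag line while both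
-- attributes are present: A then happens to list the ice_pwd key first (dict insertion
-- order, an accidental corner), B lists ice_ufrag first; the mappings are identical.
def Pre_extract_ice_credentials (sdp : String) : Prop :=
  (match (pvSplit sdp "\n").findIdx? (fun l => PySem.Str.startswith l "a=ice-ufrag:"),
         (pvSplit sdp "\n").findIdx? (fun l => PySem.Str.startswith l "a=ice-pwd:") with
   | some iu, some ip => decide (iu < ip)
   | _, _ => true) = true
instance (sdp : String) : Decidable (Pre_extract_ice_credentials sdp) := by unfold Pre_extract_ice_credentials; infer_instance

def pvWitness_extract_ice_credentials : String := "a=ice-ufrag:u\na=ice-pwd:p"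

def Spec_extract_ice_credentials (sdp : String) (out : List (String × String)) : Prop := out = extract_ice_credentials_alt sdp
instance (sdp : String) (out : List (String × String)) : Decidable (Spec_extract_ice_credentials sdp out) := by unfold Spec_extract_ice_credentials; infer_instance

-- ===== CLAIM (what is proved, stated in full; the proofs are below) =====
def Claim_equal_extract_ice_credentials : Prop := ∀ (sdp : String), Dom_extract_ice_credentials sdp → Pre_extract_ice_credentials sdp → Spec_extract_ice_credentials sdp (extract_ice_credentials sdp)

-- ===== LEMMAS AND PROOFS =====

-- proof-side helpers: last matching value, first credential kind, assembled items lists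
def pvLastMatch (lines : List String) (pre : String) : Option String :=
  pvLastGo pre lines.reverse

def pvFirstKind : List String → Option String
  | [] => none
  | l :: rest =>
    if PySem.Str.startswith l "a=ice-ufrag:" = true then some "ufrag"
    else if PySem.Str.startswith l "a=ice-pwd:" = true then some "pwd"
    else pvFirstKind rest

def pvAssemble (u p : Option String) (fk : Option String) : List (String × String) :=
  (if fk = some "pwd" then [("ice_pwd", p), ("ice_ufrag", u)]
   else [("ice_ufrag", u), ("ice_pwd", p)]).filterMap
    (fun kv => kv.2.map (fun v => (kv.1, v)))

theorem pv_not_both {l : String} (h : PySem.Str.startswith l "a=ice-ufrag:" = true) :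
    PySem.Str.startswith l "a=ice-pwd:" = false := by
  by_contra hb
  rw [Bool.not_eq_false] at hb
  rw [PySem.Str.startswith_eq, PySem.Chars.startswith_iff] at h hb
  have hle : ("a=ice-pwd:".toList).length ≤ ("a=ice-ufrag:".toList).length := by decide
  have := List.prefix_of_prefix_length_le hb h hle
  revert this; decide

theorem pvLastGo_eq_none_iff (pre : String) (xs : List String) :
    pvLastGo pre xs = none ↔ ∀ l ∈ xs, PySem.Str.startswith l pre = false := by
  induction xs with
  | nil => simp [pvLastGo]
  | cons l rest ih =>
    by_cases h : PySem.Str.startswith l pre = true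
    · simp only [pvLastGo, if_pos h]
      constructor
      · intro hc; exact absurd hc (by simp)
      · intro hall
        have hx := hall l (by simp)
        rw [h] at hx
        exact absurd hx (by decide)
    · have hf : PySem.Str.startswith l pre = false := Bool.eq_false_iff.mpr h
      simp only [pvLastGo, if_neg h, ih, List.mem_cons]
      constructor
      · intro hall m hm
        rcases hm with rfl | hm
        · exact hf
        · exact hall m hm
      · intro hall m hm; exact hall m (Or.inr hm)

theorem pvLastMatch_eq_none_iff (lines : List String) (pre : String) :
    pvLastMatch lines pre = none ↔ ∀ l ∈ lines, PySem.Str.startswith l pre = false := by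
  rw [pvLastMatch, pvLastGo_eq_none_iff]
  constructor
  · intro hall m hm; exact hall m (List.mem_reverse.mpr hm)
  · intro hall m hm; exact hall m (List.mem_reverse.mp hm)

theorem pvFirstKind_cases (ls : List String) :
    pvFirstKind ls = none ∨ pvFirstKind ls = some "ufrag" ∨ pvFirstKind ls = some "pwd" := by
  induction ls with
  | nil => left; rfl
  | cons l rest ih =>
    by_cases h1 : PySem.Str.startswith l "a=ice-ufrag:" = true
    · right; left; simp only [pvFirstKind, if_pos h1]
    · by_cases h2 : PySem.Str.startswith l "a=ice-pwd:" = true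
      · right; right; simp only [pvFirstKind, if_neg h1, if_pos h2]
      · simp only [pvFirstKind, if_neg h1, if_neg h2]; exact ih

theorem pvFirstKind_none {ls : List String} (h : pvFirstKind ls = none) :
    ∀ l ∈ ls, PySem.Str.startswith l "a=ice-ufrag:" = false ∧
      PySem.Str.startswith l "a=ice-pwd:" = false := by
  induction ls with
  | nil => simp
  | cons l rest ih =>
    by_cases h1 : PySem.Str.startswith l "a=ice-ufrag:" = true
    · simp only [pvFirstKind, if_pos h1] at h; exact absurd h (by simp)
    · by_cases h2 : PySem.Str.startswith l "a=ice-pwd:" = true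
      · simp only [pvFirstKind, if_neg h1, if_pos h2] at h; exact absurd h (by simp)
      · simp only [pvFirstKind, if_neg h1, if_neg h2] at h
        intro m hm
        rcases List.mem_cons.mp hm with rfl | hm
        · exact ⟨Bool.eq_false_iff.mpr h1, Bool.eq_false_iff.mpr h2⟩
        · exact ih h m hm

theorem pvFirstKind_ufrag {ls : List String} (h : pvFirstKind ls = some "ufrag") :
    ∃ l ∈ ls, PySem.Str.startswith l "a=ice-ufrag:" = true := by
  induction ls with
  | nil => exact absurd h (by simp [pvFirstKind])
  | cons l rest ih =>
    by_cases h1 : PySem.Str.startswith l "a=ice-ufrag:" = true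
    · exact ⟨l, by simp, h1⟩
    · by_cases h2 : PySem.Str.startswith l "a=ice-pwd:" = true
      · simp only [pvFirstKind, if_neg h1, if_pos h2] at h; exact absurd h (by simp)
      · simp only [pvFirstKind, if_neg h1, if_neg h2] at h
        obtain ⟨m, hm, hsm⟩ := ih h
        exact ⟨m, List.mem_cons_of_mem _ hm, hsm⟩

theorem pvFirstKind_pwd {ls : List String} (h : pvFirstKind ls = some "pwd") :
    ∃ l ∈ ls, PySem.Str.startswith l "a=ice-pwd:" = true := by
  induction ls with
  | nil => exact absurd h (by simp [pvFirstKind])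
  | cons l rest ih =>
    by_cases h1 : PySem.Str.startswith l "a=ice-ufrag:" = true
    · simp only [pvFirstKind, if_pos h1] at h; exact absurd h (by simp)
    · by_cases h2 : PySem.Str.startswith l "a=ice-pwd:" = true
      · exact ⟨l, by simp, h2⟩
      · simp only [pvFirstKind, if_neg h1, if_neg h2] at h
        obtain ⟨m, hm, hsm⟩ := ih h
        exact ⟨m, List.mem_cons_of_mem _ hm, hsm⟩

theorem pvLastMatch_isSome_of_exists {ls : List String} {pre : String}
    (h : ∃ l ∈ ls, PySem.Str.startswith l pre = true) :
    ∃ v, pvLastMatch ls pre = some v := by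
  cases hv : pvLastMatch ls pre with
  | some v => exact ⟨v, rfl⟩
  | none =>
    obtain ⟨l, hl, hs⟩ := h
    have := (pvLastMatch_eq_none_iff ls pre).mp hv l hl
    rw [this] at hs; exact absurd hs (by simp)

theorem pvLastMatch_append (ls : List String) (l : String) (pre : String) :
    pvLastMatch (ls ++ [l]) pre =
      if PySem.Str.startswith l pre = true then some (pvVal l) else pvLastMatch ls pre := by
  rw [pvLastMatch, List.reverse_append]
  simp only [List.reverse_singleton, List.singleton_append, pvLastGo]
  rfl

theorem pvFirstKind_append (ls ls' : List String) :
    pvFirstKind (ls ++ ls') = (pvFirstKind ls).or (pvFirstKind ls') := by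
  induction ls with
  | nil => simp [pvFirstKind]
  | cons l rest ih =>
    by_cases h1 : PySem.Str.startswith l "a=ice-ufrag:" = true
    · simp only [List.cons_append, pvFirstKind, if_pos h1]; rfl
    · by_cases h2 : PySem.Str.startswith l "a=ice-pwd:" = true
      · simp only [List.cons_append, pvFirstKind, if_neg h1, if_pos h2]; rfl
      · simp only [List.cons_append, pvFirstKind, if_neg h1, if_neg h2]; exact ih

-- the core invariant for A: its dict, read as an items list, is pvAssemble of
-- the last ufrag value, the last pwd value and the first credential kind
theorem pv_main (ls : List String) :
    (ls.foldl
      (fun (d : PySem.Dict String String) line =>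
        if PySem.Str.startswith line "a=ice-ufrag:" = true then d.insert "ice_ufrag" (pvVal line)
        else if PySem.Str.startswith line "a=ice-pwd:" = true then d.insert "ice_pwd" (pvVal line)
        else d)
      PySem.Dict.empty).items =
    pvAssemble (pvLastMatch ls "a=ice-ufrag:") (pvLastMatch ls "a=ice-pwd:") (pvFirstKind ls) := by
  induction ls using List.reverseRecOn with
  | nil => rfl
  | append_singleton ls l ih =>
    set F := (fun (d : PySem.Dict String String) line =>
        if PySem.Str.startswith line "a=ice-ufrag:" = true then d.insert "ice_ufrag" (pvVal line)
        else if PySem.Str.startswith line "a=ice-pwd:" = true then d.insert "ice_pwd" (pvVal line)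
        else d) with hF
    have hd : List.foldl F PySem.Dict.empty ls =
        PySem.Dict.mk (pvAssemble (pvLastMatch ls "a=ice-ufrag:") (pvLastMatch ls "a=ice-pwd:")
          (pvFirstKind ls)) := PySem.Dict.ext ih
    rw [List.foldl_append, List.foldl_cons, List.foldl_nil, hd,
      pvLastMatch_append, pvLastMatch_append, pvFirstKind_append, hF]
    beta_reduce
    by_cases h1 : PySem.Str.startswith l "a=ice-ufrag:" = true
    · have h2 : PySem.Str.startswith l "a=ice-pwd:" = false := pv_not_both h1
      have hn2 : ¬ PySem.Str.startswith l "a=ice-pwd:" = true := by rw [h2]; decide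
      simp only [pvFirstKind, if_pos h1, if_neg hn2]
      rcases pvFirstKind_cases ls with hfk | hfk | hfk
      · have hu : pvLastMatch ls "a=ice-ufrag:" = none := by
          rw [pvLastMatch_eq_none_iff]; intro m hm; exact (pvFirstKind_none hfk m hm).1
        have hp : pvLastMatch ls "a=ice-pwd:" = none := by
          rw [pvLastMatch_eq_none_iff]; intro m hm; exact (pvFirstKind_none hfk m hm).2
        rw [hu, hp, hfk]; rfl
      · obtain ⟨uv, hu⟩ := pvLastMatch_isSome_of_exists (pvFirstKind_ufrag hfk)
        rcases hp : pvLastMatch ls "a=ice-pwd:" with _ | pv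
        · rw [hu, hfk]; rfl
        · rw [hu, hfk]; rfl
      · obtain ⟨pv, hp⟩ := pvLastMatch_isSome_of_exists (pvFirstKind_pwd hfk)
        rcases hu : pvLastMatch ls "a=ice-ufrag:" with _ | uv
        · rw [hp, hfk]; rfl
        · rw [hp, hfk]; rfl
    · by_cases h2 : PySem.Str.startswith l "a=ice-pwd:" = true
      · simp only [pvFirstKind, if_neg h1, if_pos h2]
        rcases pvFirstKind_cases ls with hfk | hfk | hfk
        · have hu : pvLastMatch ls "a=ice-ufrag:" = none := by
            rw [pvLastMatch_eq_none_iff]; intro m hm; exact (pvFirstKind_none hfk m hm).1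
          have hp : pvLastMatch ls "a=ice-pwd:" = none := by
            rw [pvLastMatch_eq_none_iff]; intro m hm; exact (pvFirstKind_none hfk m hm).2
          rw [hu, hp, hfk]; rfl
        · obtain ⟨uv, hu⟩ := pvLastMatch_isSome_of_exists (pvFirstKind_ufrag hfk)
          rcases hp : pvLastMatch ls "a=ice-pwd:" with _ | pv
          · rw [hu, hfk]; rfl
          · rw [hu, hfk]; rfl
        · obtain ⟨pv, hp⟩ := pvLastMatch_isSome_of_exists (pvFirstKind_pwd hfk)
          rcases hu : pvLastMatch ls "a=ice-ufrag:" with _ | uv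
          · rw [hp, hfk]; rfl
          · rw [hp, hfk]; rfl
      · simp only [pvFirstKind, if_neg h1, if_neg h2, Option.or_none]

-- B's two-pair fold, evaluated: the fixed-order assembly
theorem pv_alt_eq (sdp : String) :
    extract_ice_credentials_alt sdp =
      pvAssemble (pvLastMatch (pvSplit sdp "\n") "a=ice-ufrag:")
        (pvLastMatch (pvSplit sdp "\n") "a=ice-pwd:") none := by
  unfold extract_ice_credentials_alt pvAssemble pvLastMatch
  rcases hu : pvLastGo "a=ice-ufrag:" (pvSplit sdp "\n").reverse with _ | uv <;>
    rcases hp : pvLastGo "a=ice-pwd:" (pvSplit sdp "\n").reverse with _ | pv <;>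
    simp [hu, hp, PySem.Dict.insert, PySem.Dict.empty]

-- under Pre_, the first credential kind cannot be "pwd" while a ufrag line exists
theorem pv_pre_no_ufrag {ls : List String}
    (hpre : (match ls.findIdx? (fun l => PySem.Str.startswith l "a=ice-ufrag:"),
                   ls.findIdx? (fun l => PySem.Str.startswith l "a=ice-pwd:") with
             | some iu, some ip => decide (iu < ip)
             | _, _ => true) = true)
    (hfk : pvFirstKind ls = some "pwd") :
    ∀ l ∈ ls, PySem.Str.startswith l "a=ice-ufrag:" = false := by
  induction ls with
  | nil => simp
  | cons l rest ih =>
    by_cases h1 : PySem.Str.startswith l "a=ice-ufrag:" = true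
    · simp only [pvFirstKind, if_pos h1] at hfk
      exact absurd hfk (by simp)
    · have hf1 : PySem.Str.startswith l "a=ice-ufrag:" = false := Bool.eq_false_iff.mpr h1
      by_cases h2 : PySem.Str.startswith l "a=ice-pwd:" = true
      · -- first credential line is a pwd line at index 0
        rw [List.findIdx?_cons, List.findIdx?_cons] at hpre
        simp only [hf1, h2, Bool.false_eq_true, if_false, if_true] at hpre
        intro m hm
        rcases List.mem_cons.mp hm with rfl | hm
        · exact hf1
        · by_contra hmu
          rw [Bool.not_eq_false] at hmu
          rcases hiu : rest.findIdx? (fun l => PySem.Str.startswith l "a=ice-ufrag:") with _ | iu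
          · rw [List.findIdx?_eq_none_iff] at hiu
            have := hiu m hm
            simp only [this] at hmu
            exact absurd hmu (by decide)
          · rw [hiu] at hpre
            simp only [Option.map_some] at hpre
            have := of_decide_eq_true hpre
            omega
      · simp only [pvFirstKind, if_neg h1, if_neg h2] at hfk
        rw [List.findIdx?_cons, List.findIdx?_cons] at hpre
        simp only [hf1, Bool.eq_false_iff.mpr h2, Bool.false_eq_true, if_false] at hpre
        have hpre' : (match rest.findIdx? (fun l => PySem.Str.startswith l "a=ice-ufrag:"),
                            rest.findIdx? (fun l => PySem.Str.startswith l "a=ice-pwd:") with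
                      | some iu, some ip => decide (iu < ip)
                      | _, _ => true) = true := by
          rcases hiu : rest.findIdx? (fun l => PySem.Str.startswith l "a=ice-ufrag:") with _ | iu <;>
            rcases hip : rest.findIdx? (fun l => PySem.Str.startswith l "a=ice-pwd:") with _ | ip <;>
            rw [hiu, hip] at hpre <;> simp_all
        intro m hm
        rcases List.mem_cons.mp hm with rfl | hm
        · exact hf1
        · exact ih hpre' hfk m hm

-- ===== VERDICT (by name: the statement is the Claim_ definition above) =====
theorem extract_ice_credentials_spec : Claim_equal_extract_ice_credentials := by
  intro sdp _ hpre
  unfold Spec_extract_ice_credentials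
  rw [pv_alt_eq]
  unfold extract_ice_credentials
  rw [pv_main]
  unfold Pre_extract_ice_credentials at hpre
  rcases pvFirstKind_cases (pvSplit sdp "\n") with hfk | hfk | hfk
  · rw [hfk]
  · rw [hfk]; rfl
  · rw [hfk]
    have hu : pvLastMatch (pvSplit sdp "\n") "a=ice-ufrag:" = none := by
      rw [pvLastMatch_eq_none_iff]
      exact pv_pre_no_ufrag hpre hfk
    rw [hu]
    rcases hp : pvLastMatch (pvSplit sdp "\n") "a=ice-pwd:" with _ | pv
    · rfl
    · rfl
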